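-- pv_equiv track=rewrite | github.com/oscarsun95/CodilitySolutions_Oscar | flood_depth.py | solution
-- ===== SOURCE A (Python) =====
-- def solution(A):
--     # write your code in Python 3.6
--     N = len(A)
--     if N <= 2:
--         return 0
--     stack = [A[0]]
--     curmax = 0
--     for i in range(1, N):
--         if A[i] > stack[0]:
--             if len(stack) > 1:
--                 curmax = max(curmax, min(stack[0], A[i]) - stack[-1])
--             stack = [A[i]]
--         else:
--             if stack[-1] < A[i]:
--                 curmax = max(curmax, min(A[i], stack[0]) - stack[-1])
--             elif stack[-1] > A[i]:
--                 stack.append(A[i])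
--     return curmax
-- ===== SOURCE B (Python) =====
-- def prefix_max(m, xs):
--     out = []
--     for x in xs:
--         m = max(m, x)
--         out.append(m)
--     return out
--
--
-- def solution(A):
--     if len(A) <= 2:
--         return 0
--     left = prefix_max(A[0], A)
--     right = list(reversed(prefix_max(A[-1], list(reversed(A)))))
--     best = 0
--     for (l, r), x in zip(zip(left, right), A):
--         best = max(best, min(l, r) - x)
--     return best
-- ===== Notes on version B (the rewrite author's own statement) =====
-- stated objective: alternative
-- what changed: Replaces the stateful stack-of-walls single scan with the classic two-pass prefix-max/suffix-max formulation: depth at i is min(maxleft_i, maxright_i) - A[i], and the answer is the maximum of these.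
import Mathlib
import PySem

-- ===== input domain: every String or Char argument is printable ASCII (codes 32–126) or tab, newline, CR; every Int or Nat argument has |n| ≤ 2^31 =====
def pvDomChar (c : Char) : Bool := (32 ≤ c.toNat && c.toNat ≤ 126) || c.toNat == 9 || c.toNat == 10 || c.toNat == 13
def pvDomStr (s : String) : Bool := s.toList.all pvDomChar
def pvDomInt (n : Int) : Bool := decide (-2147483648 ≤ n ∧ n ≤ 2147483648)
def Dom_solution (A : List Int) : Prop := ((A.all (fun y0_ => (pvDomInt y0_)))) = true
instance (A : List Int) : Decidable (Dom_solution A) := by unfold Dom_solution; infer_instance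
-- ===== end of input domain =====

-- B replaces A's stack-of-walls scan with the two-pass prefix-max/suffix-max formulation (alternative algorithm, same cost).

-- ===== PORT A =====
-- loop body of A's for-loop, named as a helper; stack[0]/stack[-1] are read with
-- pyGetD (default irrelevant: the stack is provably never empty, so Python never raises)
def astep (st : List Int × Int) (ai : Int) : List Int × Int :=
  let stack := st.1
  let curmax := st.2
  if PySem.List.pyGetD stack 0 0 < ai then
    if 1 < stack.length then
      ([ai], max curmax (min (PySem.List.pyGetD stack 0 0) ai - PySem.List.pyGetD stack (-1) 0))
    else
      ([ai], curmax)
  else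
    if PySem.List.pyGetD stack (-1) 0 < ai then
      (stack, max curmax (min ai (PySem.List.pyGetD stack 0 0) - PySem.List.pyGetD stack (-1) 0))
    else if ai < PySem.List.pyGetD stack (-1) 0 then
      (stack ++ [ai], curmax)
    else
      (stack, curmax)

def solution (A : List Int) : Int :=
  let N : Int := A.length
  if N ≤ 2 then 0
  else
    ((PySem.List.pyRange 1 N 1).foldl (fun st i => astep st (PySem.List.pyGetD A i 0)) ([PySem.List.pyGetD A 0 0], 0)).2

-- ===== PORT B =====
-- port of Source B's prefix_max(m, xs): the running-max loop building the prefix-maxima list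
def prefixMax (m : Int) : List Int → List Int
  | [] => []
  | x :: xs => max m x :: prefixMax (max m x) xs

def solution_alt (A : List Int) : Int :=
  if A.length ≤ 2 then 0
  else
    let left := prefixMax (A.headD 0) A
    let right := (prefixMax (A.reverse.headD 0) A.reverse).reverse
    ((left.zip right).zip A).foldl (fun b p => max b (min p.1.1 p.1.2 - p.2)) 0

-- ===== PRECONDITION & SPEC =====
def Spec_solution (A : List Int) (out : Int) : Prop := out = solution_alt A
instance (A : List Int) (out : Int) : Decidable (Spec_solution A out) := by unfold Spec_solution; infer_instance

-- ===== CLAIM (what is proved, stated in full; the proofs are below) =====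
def Claim_equal_solution : Prop := ∀ (A : List Int), Dom_solution A → Spec_solution A (solution A)

-- ===== LEMMAS AND PROOFS =====

-- fold-with-max abstraction: fmax g b ts = max(b, max of g over ts)
def fmax {α : Type} (g : α → Int) (b : Int) (ts : List α) : Int :=
  ts.foldl (fun c t => max c (g t)) b

theorem fmax_nil {α : Type} (g : α → Int) (b : Int) : fmax g b [] = b := rfl

theorem fmax_cons {α : Type} (g : α → Int) (b : Int) (t : α) (ts : List α) :
    fmax g b (t :: ts) = fmax g (max b (g t)) ts := rfl

theorem le_fmax_init {α : Type} (g : α → Int) (b : Int) (ts : List α) : b ≤ fmax g b ts := by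
  induction ts generalizing b with
  | nil => simp [fmax]
  | cons t ts ih => exact le_trans (le_max_left _ _) (ih (max b (g t)))

theorem le_fmax_of_mem {α : Type} {g : α → Int} {t : α} {ts : List α} (b : Int)
    (h : t ∈ ts) : g t ≤ fmax g b ts := by
  induction ts generalizing b with
  | nil => cases h
  | cons s ts ih =>
    rcases List.mem_cons.mp h with h | h
    · subst h; exact le_trans (le_max_right _ _) (le_fmax_init g _ ts)
    · exact ih _ h

theorem fmax_le {α : Type} {g : α → Int} {c : Int} (b : Int) {ts : List α}
    (hb : b ≤ c) (h : ∀ t ∈ ts, g t ≤ c) : fmax g b ts ≤ c := by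
  induction ts generalizing b with
  | nil => exact hb
  | cons t ts ih =>
    exact ih _ (max_le hb (h t List.mem_cons_self)) (fun s hs => h s (List.mem_cons_of_mem _ hs))

theorem fmax_mono {α : Type} {g g' : α → Int} {b b' : Int} {ts : List α}
    (hb : b ≤ b') (h : ∀ t ∈ ts, g t ≤ g' t) : fmax g b ts ≤ fmax g' b' ts := by
  induction ts generalizing b b' with
  | nil => exact hb
  | cons t ts ih =>
    exact ih (max_le_max hb (h t List.mem_cons_self)) (fun s hs => h s (List.mem_cons_of_mem _ hs))

theorem fmax_congr {α : Type} {g g' : α → Int} {b : Int} {ts : List α}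
    (h : ∀ t ∈ ts, g t = g' t) : fmax g b ts = fmax g' b ts :=
  le_antisymm (fmax_mono le_rfl (fun t ht => le_of_eq (h t ht)))
    (fmax_mono le_rfl (fun t ht => le_of_eq (h t ht).symm))

theorem fmax_append {α : Type} (g : α → Int) (b : Int) (us vs : List α) :
    fmax g b (us ++ vs) = fmax g (fmax g b us) vs := by
  simp [fmax, List.foldl_append]

theorem fmax_map {α β : Type} (g : β → Int) (b : Int) (F : α → β) (ts : List α) :
    fmax g b (ts.map F) = fmax (fun t => g (F t)) b ts := by
  simp [fmax, List.foldl_map]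

-- max of a nonempty list (0 on [])
def M (l : List Int) : Int := l.tail.foldl max (l.headD 0)

theorem le_M_of_mem {l : List Int} {y : Int} (h : y ∈ l) : y ≤ M l := by
  cases l with
  | nil => cases h
  | cons a t =>
    rcases List.mem_cons.mp h with h | h
    · subst h; exact (PySem.List.le_foldl_max t y).1
    · exact (PySem.List.le_foldl_max t a).2 y h

theorem M_append {l : List Int} (h : l ≠ []) (x : Int) : M (l ++ [x]) = max (M l) x := by
  cases l with
  | nil => exact absurd rfl h
  | cons a t => simp [M, List.foldl_append]

theorem foldl_max_headD {l : List Int} (h : l ≠ []) : l.foldl max (l.headD 0) = M l := by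
  cases l with
  | nil => exact absurd rfl h
  | cons a t => simp [M, List.foldl_cons]

-- prefixMax lemmas
theorem length_prefixMax (m : Int) (l : List Int) : (prefixMax m l).length = l.length := by
  induction l generalizing m with
  | nil => rfl
  | cons x xs ih => simp [prefixMax, ih]

theorem prefixMax_append_general (s : Int) (u v : List Int) :
    prefixMax s (u ++ v) = prefixMax s u ++ prefixMax (u.foldl max s) v := by
  induction u generalizing s with
  | nil => rfl
  | cons a u ih => simp [prefixMax, ih, List.foldl_cons]

theorem prefixMax_max_comm (m x : Int) (l : List Int) :
    prefixMax (max m x) l = (prefixMax m l).map (fun r => max r x) := by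
  induction l generalizing m with
  | nil => rfl
  | cons y ys ih =>
    simp only [prefixMax, List.map_cons, List.cons.injEq]
    refine ⟨max_right_comm m x y, ?_⟩
    rw [max_right_comm m x y]; exact ih (max m y)

theorem prefixMax_const {m : Int} {l : List Int} (h : ∀ y ∈ l, y ≤ m) :
    prefixMax m l = l.map (fun _ => m) := by
  induction l with
  | nil => rfl
  | cons y ys ih =>
    have hy : max m y = m := max_eq_left (h y List.mem_cons_self)
    simp only [prefixMax, List.map_cons, hy, List.cons.injEq, true_and]
    exact (ih (fun z hz => h z (List.mem_cons_of_mem _ hz)))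

theorem mem_prefixMax_le {m s : Int} {l : List Int} (hs : s ≤ m) (h : ∀ y ∈ l, y ≤ m) :
    ∀ r ∈ prefixMax s l, r ≤ m := by
  induction l generalizing s with
  | nil => intro r hr; cases hr
  | cons y ys ih =>
    intro r hr
    rcases List.mem_cons.mp hr with hr | hr
    · subst hr; exact max_le hs (h y List.mem_cons_self)
    · exact ih (max_le hs (h y List.mem_cons_self)) (fun z hz => h z (List.mem_cons_of_mem _ hz)) r hr

theorem foldl_max_lt {m s : Int} {l : List Int} (hs : s < m) (h : ∀ y ∈ l, y < m) :
    l.foldl max s < m := by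
  induction l generalizing s with
  | nil => exact hs
  | cons y ys ih =>
    exact ih (max_lt hs (h y List.mem_cons_self)) (fun z hz => h z (List.mem_cons_of_mem _ hz))

-- B-side abstractions
def Lpm (l : List Int) : List Int := prefixMax (l.headD 0) l
def Rsm (l : List Int) : List Int := (prefixMax (l.reverse.headD 0) l.reverse).reverse
def term3 (t : (Int × Int) × Int) : Int := min t.1.1 t.1.2 - t.2
def Zl (l : List Int) : List ((Int × Int) × Int) := ((Lpm l).zip (Rsm l)).zip l
def W (l : List Int) : Int := fmax term3 0 (Zl l)

theorem length_Lpm (l : List Int) : (Lpm l).length = l.length := length_prefixMax _ _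
theorem length_Rsm (l : List Int) : (Rsm l).length = l.length := by
  simp [Rsm, length_prefixMax]

theorem solution_alt_eq_W {A : List Int} (h : ¬ (A.length ≤ 2)) : solution_alt A = W A := by
  simp [solution_alt, h, W, Zl, fmax, term3, Lpm, Rsm]

-- simple state machine equivalent to A's stack loop: state (m, rmin, cur)
def sstep (s : Int × Int × Int) (x : Int) : Int × Int × Int :=
  (max s.1 x, if s.1 < x then x else min s.2.1 x, max s.2.2 (min s.1 x - s.2.1))

-- Phase 1: the stack loop and the simple state machine agree
theorem stack_eq_sstep (xs : List Int) :
    ∀ (stack : List Int) (cur m rmin : Int), stack ≠ [] →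
    PySem.List.pyGetD stack 0 0 = m → PySem.List.pyGetD stack (-1) 0 = rmin →
    rmin ≤ m → (1 < stack.length ↔ rmin < m) → 0 ≤ cur →
    (xs.foldl astep (stack, cur)).2 = (xs.foldl sstep (m, rmin, cur)).2.2 := by
  induction xs with
  | nil => intro _ _ _ _ _ _ _ _ _ _; rfl
  | cons x xs ih =>
    rintro (_ | ⟨a, ss⟩) cur m rmin hne hh hl hrm hiff hc
    · exact absurd rfl hne
    rw [PySem.List.pyGetD_zero_cons] at hh
    subst hh
    rw [List.foldl_cons, List.foldl_cons]
    show ((xs.foldl astep (astep (a :: ss, cur) x))).2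
      = (xs.foldl sstep (max a x, if a < x then x else min rmin x,
          max cur (min a x - rmin))).2.2
    simp only [astep, PySem.List.pyGetD_zero_cons, hl]
    by_cases h1 : a < x
    · have hmax : max a x = x := max_eq_right h1.le
      have hmin : min a x = a := min_eq_left h1.le
      simp only [h1, if_pos, hmax, hmin]
      by_cases h2 : 1 < (a :: ss).length
      · have hrl : rmin < a := hiff.mp h2
        simp only [h2, if_pos]
        exact ih [x] (max cur (a - rmin)) x x (by simp)
          (PySem.List.pyGetD_zero_cons _ _ _)
          (by rw [PySem.List.pyGetD_neg_one _ 0 (by simp)]; rfl)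
          le_rfl (by simp) (le_trans hc (le_max_left _ _))
      · have hss : ss = [] := by
          cases ss with
          | nil => rfl
          | cons b bs => exact absurd (by simp) h2
        subst hss
        have hra : rmin = a := by
          rw [PySem.List.pyGetD_neg_one _ 0 (by simp)] at hl
          simp [List.getLast] at hl; omega
        have : max cur (a - rmin) = cur := by rw [hra]; simp [hc]
        simp only [h2, this]
        exact ih [x] cur x x (by simp)
          (PySem.List.pyGetD_zero_cons _ _ _)
          (by rw [PySem.List.pyGetD_neg_one _ 0 (by simp)]; rfl)
          le_rfl (by simp) hc
    · have hmax : max a x = a := max_eq_left (not_lt.mp h1)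
      have hmin : min a x = x := min_eq_right (not_lt.mp h1)
      simp only [h1, hmax, hmin]
      by_cases h3 : rmin < x
      · have hminx : min x a = x := min_eq_left (not_lt.mp h1)
        have hminr : min rmin x = rmin := min_eq_left h3.le
        simp only [h3, if_pos, hminx, hminr]
        exact ih (a :: ss) (max cur (x - rmin)) a rmin (by simp) (PySem.List.pyGetD_zero_cons _ _ _) hl hrm hiff
          (le_trans hc (le_max_left _ _))
      · by_cases h4 : x < rmin
        · have hminr : min rmin x = x := min_eq_right h4.le
          have hcur : max cur (x - rmin) = cur := max_eq_left (by omega)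
          simp only [h3, h4, if_pos, hminr, hcur]
          exact ih ((a :: ss) ++ [x]) cur a x (by simp)
            (PySem.List.pyGetD_zero_cons _ _ _)
            (PySem.List.pyGetD_neg_one_append_singleton _ _ _)
            (by omega) (by simp; omega) hc
        · have hxr : x = rmin := le_antisymm (not_lt.mp h3) (not_lt.mp h4)
          have hminr : min rmin x = rmin := by omega
          have hcur : max cur (x - rmin) = cur := by rw [hxr]; simp [hc]
          simp only [h3, h4, hminr, hcur]
          exact ih (a :: ss) cur a rmin hne (PySem.List.pyGetD_zero_cons _ _ _) hl hrm hiff hc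

-- Phase 2 invariant: decomposition of the already-seen list
def SInv (l : List Int) (m rmin : Int) : Prop :=
  m = M l ∧ ∃ u v, l = u ++ v ∧ v ≠ [] ∧ (∀ y ∈ u, y < m) ∧ v.headD 0 = m ∧
    rmin = v.foldl min m

theorem headD_mem {l : List Int} (h : l ≠ []) : l.headD 0 ∈ l := by
  cases l with
  | nil => exact absurd rfl h
  | cons a t => exact List.mem_cons_self

theorem foldl_max_le {m s : Int} {l : List Int} (hs : s ≤ m) (h : ∀ y ∈ l, y ≤ m) :
    l.foldl max s ≤ m := by
  induction l generalizing s with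
  | nil => exact hs
  | cons y ys ih =>
    exact ih (max_le hs (h y List.mem_cons_self)) (fun z hz => h z (List.mem_cons_of_mem _ hz))

theorem Lpm_decomp {u v : List Int} {m : Int} (hv : v ≠ []) (hu : ∀ y ∈ u, y < m)
    (hvh : v.headD 0 = m) (hle : ∀ y ∈ u ++ v, y ≤ m) :
    ∃ Lu, Lpm (u ++ v) = Lu ++ v.map (fun _ => m) ∧ Lu.length = u.length ∧ ∀ r ∈ Lu, r ≤ m := by
  obtain ⟨c, v', rfl⟩ : ∃ c v', v = c :: v' := by
    cases v with
    | nil => exact absurd rfl hv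
    | cons c v' => exact ⟨c, v', rfl⟩
  have hc : c = m := by simpa using hvh
  subst hc
  have hv'le : ∀ y ∈ v', y ≤ c := fun y hy =>
    hle y (List.mem_append_right _ (List.mem_cons_of_mem _ hy))
  cases u with
  | nil =>
    refine ⟨[], ?_, rfl, by simp⟩
    simp only [List.nil_append, Lpm, List.headD_cons, prefixMax, max_self, List.map_cons]
    rw [prefixMax_const hv'le]
  | cons b u' =>
    have hble : b < c := hu b List.mem_cons_self
    refine ⟨prefixMax b (b :: u'), ?_, length_prefixMax _ _, ?_⟩
    · have hLpm : Lpm ((b :: u') ++ c :: v')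
          = prefixMax b (b :: u') ++ prefixMax ((b :: u').foldl max b) (c :: v') := by
        simp only [Lpm, List.cons_append, List.headD_cons]
        exact prefixMax_append_general b (b :: u') (c :: v')
      rw [hLpm]
      have hs : (b :: u').foldl max b < c := foldl_max_lt hble hu
      have : prefixMax ((b :: u').foldl max b) (c :: v') = (c :: v').map (fun _ => c) := by
        simp only [prefixMax, List.map_cons, max_eq_right hs.le]
        rw [prefixMax_const hv'le]
      rw [this]
    · exact mem_prefixMax_le hble.le (fun y hy => (hu y hy).le)

theorem Rsm_decomp {u v : List Int} {m : Int} (hv : v ≠ []) (hu : ∀ y ∈ u, y < m)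
    (hvh : v.headD 0 = m) (hle : ∀ y ∈ u ++ v, y ≤ m) :
    ∃ Rv, Rsm (u ++ v) = u.map (fun _ => m) ++ Rv ∧ Rv.length = v.length := by
  have hvr : v.reverse ≠ [] := by simpa using hv
  have hrev : (u ++ v).reverse = v.reverse ++ u.reverse := by simp
  have hhd : (v.reverse ++ u.reverse).headD 0 = v.reverse.headD 0 := by
    cases hvv : v.reverse with
    | nil => exact absurd hvv hvr
    | cons a t => simp
  have hrmem : v.reverse.headD 0 ∈ v := List.mem_reverse.mp (headD_mem hvr)
  have hrle : v.reverse.headD 0 ≤ m := hle _ (List.mem_append_right _ hrmem)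
  have hmmem : m ∈ v.reverse := by
    rw [List.mem_reverse, ← hvh]; exact headD_mem hv
  have hs2 : v.reverse.foldl max (v.reverse.headD 0) = m := by
    refine le_antisymm (foldl_max_le hrle ?_) ((PySem.List.le_foldl_max _ _).2 m hmmem)
    intro y hy
    exact hle y (List.mem_append_right _ (List.mem_reverse.mp hy))
  refine ⟨(prefixMax (v.reverse.headD 0) v.reverse).reverse, ?_, by simp [length_prefixMax]⟩
  have : Rsm (u ++ v)
      = (prefixMax (v.reverse.headD 0) v.reverse ++ prefixMax m u.reverse).reverse := by
    simp only [Rsm, hrev, hhd]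
    rw [prefixMax_append_general, hs2]
  rw [this, prefixMax_const (fun y hy => (hu y (List.mem_reverse.mp hy)).le)]
  simp

theorem Lpm_append {l : List Int} (hl : l ≠ []) (x : Int) :
    Lpm (l ++ [x]) = Lpm l ++ [max (M l) x] := by
  cases l with
  | nil => exact absurd rfl hl
  | cons a t =>
    show prefixMax (((a :: t) ++ [x]).headD 0) ((a :: t) ++ [x])
      = prefixMax ((a :: t).headD 0) (a :: t) ++ [max (M (a :: t)) x]
    rw [show ((a :: t) ++ [x]).headD 0 = a from rfl, show (a :: t).headD 0 = a from rfl,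
      prefixMax_append_general a (a :: t) [x]]
    have hfm : List.foldl max a (a :: t) = M (a :: t) := by
      simpa using foldl_max_headD (l := a :: t) (by simp)
    rw [show ∀ s : Int, prefixMax s [x] = [max s x] from fun _ => rfl, hfm]

theorem Rsm_append {l : List Int} (hl : l ≠ []) (x : Int) :
    Rsm (l ++ [x]) = (Rsm l).map (fun r => max r x) ++ [x] := by
  have hrev : (l ++ [x]).reverse = x :: l.reverse := by simp
  cases hr : l.reverse with
  | nil => exact absurd (by simpa using congrArg List.reverse hr) hl
  | cons h' t' =>
    have h1 : prefixMax x (h' :: t') = prefixMax (max h' x) (h' :: t') := by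
      simp only [prefixMax, List.cons.injEq]
      have e1 : max x h' = max (max h' x) h' := by rw [max_right_comm, max_self, max_comm]
      exact ⟨e1, by rw [← e1]⟩
    simp only [Rsm, hrev, hr, List.headD_cons]
    rw [show prefixMax x (x :: h' :: t') = x :: prefixMax x (h' :: t') from by
      simp [prefixMax]]
    rw [h1, prefixMax_max_comm h' x (h' :: t')]
    simp

theorem Zl_append {l : List Int} (hl : l ≠ []) (x : Int) :
    Zl (l ++ [x]) = (Zl l).map (Prod.map (Prod.map id (fun r => max r x)) id)
      ++ [((max (M l) x, x), x)] := by
  simp only [Zl, Lpm_append hl x, Rsm_append hl x]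
  rw [List.zip_append (by simp [length_Lpm, length_Rsm])]
  rw [List.zip_map_right]
  rw [List.zip_append (by simp [List.length_zip, length_Lpm, length_Rsm])]
  rw [List.zip_map_left]
  rfl

-- Crux: one append step on W
theorem W_append {l : List Int} {m rmin : Int} (hl : l ≠ []) (hinv : SInv l m rmin) (x : Int) :
    W (l ++ [x]) = max (W l) (min m x - rmin) := by
  obtain ⟨hm, u, v, rfl, hv, hu, hvh, hrmin⟩ := hinv
  have hle : ∀ y ∈ u ++ v, y ≤ m := fun y hy => hm ▸ le_M_of_mem hy
  obtain ⟨Lu, hL, hLlen, hLle⟩ := Lpm_decomp hv hu hvh hle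
  obtain ⟨Rv, hR, hRlen⟩ := Rsm_decomp hv hu hvh hle
  have hsplit : Zl (u ++ v)
      = (Lu.zip (u.map (fun _ => m))).zip u ++ ((v.map (fun _ => m)).zip Rv).zip v := by
    rw [Zl, hL, hR, List.zip_append (by simp [hLlen]),
      List.zip_append (by simp [List.length_zip, hLlen])]
  have hq : W ((u ++ v) ++ [x])
      = fmax (fun t => term3 (Prod.map (Prod.map id (fun r => max r x)) id t)) 0
          (Zl (u ++ v)) := by
    rw [W, Zl_append hl x, fmax_append, fmax_map, fmax_cons, fmax_nil]
    have hterm : term3 ((max (M (u ++ v)) x, x), x) = 0 := by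
      simp [term3]
    rw [hterm]
    exact max_eq_left (le_fmax_init _ _ _)
  have hcongru : fmax (fun t => term3 (Prod.map (Prod.map id (fun r => max r x)) id t)) 0
      ((Lu.zip (u.map (fun _ => m))).zip u)
      = fmax term3 0 ((Lu.zip (u.map (fun _ => m))).zip u) := by
    apply fmax_congr
    rintro ⟨⟨p, r⟩, y⟩ ht
    obtain ⟨h1, h2⟩ := List.of_mem_zip ht
    obtain ⟨hp', hr'⟩ := List.of_mem_zip h1
    have hp : p ≤ m := hLle p hp'
    obtain ⟨b, _, hb⟩ := List.mem_map.mp hr'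
    have hr : r = m := hb.symm
    subst hr
    have e1 : min p (max r x) = p := min_eq_left (hp.trans (le_max_left r x))
    have e2 : min p r = p := min_eq_left hp
    simp [term3, Prod.map, e1, e2]
  have hc0 : (0 : Int) ≤ fmax term3 0 ((Lu.zip (u.map (fun _ => m))).zip u) :=
    le_fmax_init _ _ _
  have hrminle : ∀ y ∈ v, rmin ≤ y := fun y hy => hrmin ▸ (PySem.List.foldl_min_le v m).2 y hy
  have hcrux : fmax (fun t => term3 (Prod.map (Prod.map id (fun r => max r x)) id t))
        (fmax term3 0 ((Lu.zip (u.map (fun _ => m))).zip u))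
        (((v.map (fun _ => m)).zip Rv).zip v)
      = max (fmax term3 (fmax term3 0 ((Lu.zip (u.map (fun _ => m))).zip u))
          (((v.map (fun _ => m)).zip Rv).zip v)) (min m x - rmin) := by
    apply le_antisymm
    · refine fmax_le _ (le_trans (le_fmax_init _ _ _) (le_max_left _ _)) ?_
      rintro ⟨⟨p, r⟩, y⟩ ht
      obtain ⟨h1, h2⟩ := List.of_mem_zip ht
      obtain ⟨hp', hrv⟩ := List.of_mem_zip h1
      obtain ⟨b, _, hb⟩ := List.mem_map.mp hp'
      have hp : p = m := hb.symm
      subst hp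
      have hy : rmin ≤ y := hrminle y h2
      have hA : min p r - y
          ≤ fmax term3 (fmax term3 0 ((Lu.zip (u.map (fun _ => p))).zip u))
              (((v.map (fun _ => p)).zip Rv).zip v) := le_fmax_of_mem _ ht
      have hB : min p x - y ≤ min p x - rmin := by omega
      calc (fun t => term3 (Prod.map (Prod.map id (fun r => max r x)) id t)) ((p, r), y)
          = max (min p r - y) (min p x - y) := by
            simp only [term3, Prod.map, id_eq, min_max_distrib_left, max_sub_sub_right]
        _ ≤ _ := max_le_max hA hB
    · refine max_le (fmax_mono le_rfl ?_) ?_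
      · rintro ⟨⟨p, r⟩, y⟩ _
        simp only [term3, Prod.map, id_eq]
        exact sub_le_sub_right (min_le_min_left p (le_max_left r x)) y
      · have hrmem : rmin ∈ v := by
          rcases PySem.List.foldl_min_mem v m with h | h
          · rw [hrmin, h, ← hvh]; exact headD_mem hv
          · exact hrmin ▸ h
        obtain ⟨j, hj, hvj⟩ := List.getElem_of_mem hrmem
        have hjz : j < ((((v.map (fun _ => m)).zip Rv)).zip v).length := by
          simp [List.length_zip, hRlen]; omega
        have hZvj : ((((v.map (fun _ => m)).zip Rv)).zip v)[j]
            = ((m, Rv[j]'(by omega : j < Rv.length)), v[j]'hj) := by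
          simp [List.getElem_zip]
        refine le_trans ?_ (le_fmax_of_mem _ (List.getElem_mem hjz))
        rw [hZvj]
        simp only [term3, Prod.map, id_eq, hvj]
        have : min m x ≤ min m (max (Rv[j]'(by omega : j < Rv.length)) x) :=
          min_le_min_left m (le_max_right _ x)
        omega
  rw [hq, hsplit, fmax_append, hcongru, hcrux, W, hsplit, fmax_append]

-- main induction
theorem main_lemma : ∀ (l : List Int), l ≠ [] →
    (l.tail.foldl sstep (l.headD 0, l.headD 0, 0)).1 = M l ∧
    SInv l (l.tail.foldl sstep (l.headD 0, l.headD 0, 0)).1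
        (l.tail.foldl sstep (l.headD 0, l.headD 0, 0)).2.1 ∧
    (l.tail.foldl sstep (l.headD 0, l.headD 0, 0)).2.2 = W l ∧
    0 ≤ (l.tail.foldl sstep (l.headD 0, l.headD 0, 0)).2.2 := by
  intro l
  induction l using List.reverseRecOn with
  | nil => intro h; exact absurd rfl h
  | append_singleton l x ih =>
    intro _
    by_cases hl : l = []
    · subst hl
      simp only [List.nil_append, List.tail_cons, List.foldl_nil, List.headD_cons]
      refine ⟨by simp [M], ⟨by simp [M], [], [x], rfl, by simp, by simp, by simp, by simp⟩,
        ?_, le_rfl⟩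
      simp [W, Zl, Lpm, Rsm, prefixMax, fmax, term3]
    · obtain ⟨ih1, ih2, ih3, ih4⟩ := ih hl
      have htail : (l ++ [x]).tail = l.tail ++ [x] := by
        cases l with
        | nil => exact absurd rfl hl
        | cons a t => rfl
      have hhead : (l ++ [x]).headD 0 = l.headD 0 := by
        cases l with
        | nil => exact absurd rfl hl
        | cons a t => rfl
      rw [htail, hhead, List.foldl_append, List.foldl_cons, List.foldl_nil]
      set s := l.tail.foldl sstep (l.headD 0, l.headD 0, 0) with hs
      have h1 : (sstep s x).1 = M (l ++ [x]) := by
        rw [M_append hl, ← ih1]; rfl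
      refine ⟨h1, ?_, ?_, ?_⟩
      · obtain ⟨hm, u, v, huv, hv, hu, hvh, hrm⟩ := ih2
        refine ⟨h1, ?_⟩
        by_cases hx : s.1 < x
        · have hsx : (sstep s x).1 = x := by simp [sstep, max_eq_right hx.le]
          refine ⟨l, [x], rfl, by simp, ?_, by simp [hsx], ?_⟩
          · intro y hy
            have hyM : y ≤ M l := le_M_of_mem hy
            rw [← ih1] at hyM
            rw [hsx]; omega
          · simp [sstep, hx]
        · have hsx : (sstep s x).1 = s.1 := by simp [sstep, max_eq_left (not_lt.mp hx)]
          refine ⟨u, v ++ [x], by rw [huv, List.append_assoc], by simp, ?_, ?_, ?_⟩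
          · intro y hy; rw [hsx]; exact hu y hy
          · cases v with
            | nil => exact absurd rfl hv
            | cons c v' => simpa [hsx] using hvh
          · rw [hsx]
            show (sstep s x).2.1 = (v ++ [x]).foldl min s.1
            simp only [sstep, if_neg hx, List.foldl_append, List.foldl_cons,
              List.foldl_nil, ← hrm]
      · show max s.2.2 (min s.1 x - s.2.1) = W (l ++ [x])
        rw [W_append hl ih2 x, ih3]
      · exact le_trans ih4 (le_max_left _ _)

-- ===== VERDICT (by name: the statement is the Claim_ definition above) =====
theorem solution_spec : Claim_equal_solution := by
  intro A _
  unfold Spec_solution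
  by_cases h : (A.length : Int) ≤ 2
  · have hn : A.length ≤ 2 := by exact_mod_cast h
    simp [solution, solution_alt, h, hn]
  · have hn : ¬ A.length ≤ 2 := by
      intro hc; exact h (by exact_mod_cast hc)
    obtain ⟨a, t, rfl⟩ : ∃ a t, A = a :: t := by
      cases A with
      | nil => exact absurd (by norm_num) h
      | cons a t => exact ⟨a, t, rfl⟩
    have hfold := PySem.List.foldl_pyRange_pyGetD' (a :: t) 0 astep
      ([PySem.List.pyGetD (a :: t) 0 0], 0) (a := 1) (by norm_num)
    have hsol : solution (a :: t) = (t.foldl astep ([a], 0)).2 := by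
      simp only [solution, if_neg h]
      rw [hfold]
      rw [PySem.List.pyGetD_zero_cons]
      rfl
    have hstack := stack_eq_sstep t [a] 0 a a (by simp)
      (PySem.List.pyGetD_zero_cons _ _ _)
      (by rw [PySem.List.pyGetD_neg_one _ 0 (by simp)]; rfl)
      le_rfl (by simp) le_rfl
    obtain ⟨_, _, hW, _⟩ := main_lemma (a :: t) (by simp)
    rw [hsol, hstack]
    rw [show (a :: t).tail = t from rfl, show (a :: t).headD 0 = a from rfl] at hW
    rw [hW, solution_alt_eq_W hn]
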